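-- pv_equiv track=rewrite | github.com/kyle-silver/mystery-box-puzzles | curate.py | all_letters_sufficiently_used
-- ===== SOURCE A (Python) =====
-- from typing import List
--
-- def all_letters_sufficiently_used(jumble: str, words: List[str]) -> bool:
--     all_words = "".join(words)
--     frequencies = {
--         c: 0
--         for c in jumble
--     }
--     for word in words:
--         for c in word:
--             if c in frequencies.keys():
--                 frequencies[c] += 1;
--     return all(v > 3 for v in frequencies.values())
-- ===== SOURCE B (Python) =====
-- from typing import List
--
-- def all_letters_sufficiently_used(jumble: str, words: List[str]) -> bool:
--     return all(sum(w.count(c) for w in words) > 3 for c in set(jumble))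
-- ===== Notes on version B (the rewrite author's own statement) =====
-- stated objective: simpler
-- what changed: Replaces the zero-initialised frequency dict, the dead join, and the nested accumulation loops with a one-line per-distinct-letter rescan: for each letter in set(jumble) sum w.count(c) across the words and require every total > 3.
import Mathlib
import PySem

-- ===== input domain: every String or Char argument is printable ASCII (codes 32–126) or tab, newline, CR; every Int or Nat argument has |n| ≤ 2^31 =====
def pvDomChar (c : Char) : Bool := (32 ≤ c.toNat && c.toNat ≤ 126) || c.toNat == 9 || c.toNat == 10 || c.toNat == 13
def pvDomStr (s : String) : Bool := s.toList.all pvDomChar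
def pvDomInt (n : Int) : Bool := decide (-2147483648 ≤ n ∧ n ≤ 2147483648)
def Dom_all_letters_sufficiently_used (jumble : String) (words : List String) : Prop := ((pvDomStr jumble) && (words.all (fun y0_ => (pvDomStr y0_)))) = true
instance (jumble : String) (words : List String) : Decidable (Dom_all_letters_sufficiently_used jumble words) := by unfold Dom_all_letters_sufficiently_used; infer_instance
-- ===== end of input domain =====

-- B replaces the frequency dict, the dead join and the nested accumulating loops with a
-- one-line per-letter rescan of the words (objective: simpler; not claimed faster).

-- ===== PORT A =====
def all_letters_sufficiently_used (jumble : String) (words : List String) : Bool :=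
  let _all_words := PySem.Str.join "" words   -- dead in A too
  let frequencies : PySem.Dict Char Int :=
    jumble.toList.foldl (fun d c => d.insert c 0) PySem.Dict.empty
  let frequencies :=
    words.foldl (fun d word =>
      word.toList.foldl (fun d c =>
        if d.contains c then d.modify c 0 (· + 1) else d) d) frequencies
  frequencies.values.all (fun v => decide (3 < v))

-- ===== PORT B =====
-- w.count(c) with a single-character needle is exactly the number of occurrences of the
-- character c in w, i.e. w.toList.count c.
def all_letters_sufficiently_used_alt (jumble : String) (words : List String) : Bool :=
  (PySem.Set.ofList jumble.toList).all (fun c =>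
    decide (3 < (words.map (fun w => (w.toList.count c : Int))).sum))

-- ===== PRECONDITION & SPEC =====
def Spec_all_letters_sufficiently_used (jumble : String) (words : List String) (out : Bool) : Prop := out = all_letters_sufficiently_used_alt jumble words
instance (jumble : String) (words : List String) (out : Bool) : Decidable (Spec_all_letters_sufficiently_used jumble words out) := by unfold Spec_all_letters_sufficiently_used; infer_instance

-- ===== CLAIM (what is proved, stated in full; the proofs are below) =====
def Claim_equal_all_letters_sufficiently_used : Prop := ∀ (jumble : String) (words : List String), Dom_all_letters_sufficiently_used jumble words → Spec_all_letters_sufficiently_used jumble words (all_letters_sufficiently_used jumble words)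

-- ===== LEMMAS AND PROOFS =====

-- the initial dict {c: 0 for c in jumble}
theorem pv_init_get? (l : List Char) (d : PySem.Dict Char Int) (x : Char) :
    (l.foldl (fun d c => d.insert c 0) d).get? x
      = if x ∈ l then some 0 else d.get? x := by
  induction l generalizing d with
  | nil => simp
  | cons c l ih =>
    simp only [List.foldl_cons, ih, PySem.Dict.get?_insert, List.mem_cons]
    by_cases hx : x = c <;> by_cases hl : x ∈ l <;> simp [hx, hl]

theorem pv_inner_keys (l : List Char) (d : PySem.Dict Char Int) :
    (l.foldl (fun d c => if d.contains c then d.modify c 0 (· + 1) else d) d).keys = d.keys := by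
  induction l generalizing d with
  | nil => rfl
  | cons c l ih =>
    simp only [List.foldl_cons]
    by_cases h : d.contains c = true
    · rw [if_pos h, ih, PySem.Dict.keys_modify, PySem.Dict.keys_insert_of_contains _ _ h]
    · rw [if_neg h, ih]

theorem pv_inner_getD (l : List Char) (d : PySem.Dict Char Int) (x : Char)
    (hx : d.contains x = true) :
    (l.foldl (fun d c => if d.contains c then d.modify c 0 (· + 1) else d) d).getD x 0
      = d.getD x 0 + (l.count x : Int) := by
  induction l generalizing d with
  | nil => simp
  | cons c l ih =>
    simp only [List.foldl_cons]
    by_cases h : d.contains c = true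
    · rw [if_pos h, ih _ (by rw [PySem.Dict.contains_modify]; simp [hx]),
        PySem.Dict.getD_modify]
      by_cases hxc : x = c
      · subst hxc; simp; ring
      · simp [hxc, Ne.symm hxc]
    · rw [if_neg h, ih _ hx]
      have hxc : x ≠ c := by rintro rfl; exact h hx
      simp [Ne.symm hxc]

theorem pv_outer_keys (ws : List String) (d : PySem.Dict Char Int) :
    (ws.foldl (fun d word =>
        word.toList.foldl (fun d c => if d.contains c then d.modify c 0 (· + 1) else d) d) d).keys
      = d.keys := by
  induction ws generalizing d with
  | nil => rfl
  | cons w ws ih => simp only [List.foldl_cons, ih, pv_inner_keys]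

theorem pv_outer_getD (ws : List String) (d : PySem.Dict Char Int) (x : Char)
    (hx : d.contains x = true) :
    (ws.foldl (fun d word =>
        word.toList.foldl (fun d c => if d.contains c then d.modify c 0 (· + 1) else d) d) d).getD x 0
      = d.getD x 0 + (ws.map (fun w => (w.toList.count x : Int))).sum := by
  induction ws generalizing d with
  | nil => simp
  | cons w ws ih =>
    have hc : (w.toList.foldl (fun d c => if d.contains c then d.modify c 0 (· + 1) else d) d).contains x = true := by
      rw [PySem.Dict.contains_eq_decide_mem_keys, pv_inner_keys,
        ← PySem.Dict.contains_eq_decide_mem_keys]; exact hx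
    simp only [List.foldl_cons, ih _ hc, pv_inner_getD _ _ _ hx, List.map_cons, List.sum_cons]
    ring

theorem pv_d0_contains (jumble : String) (x : Char) :
    (jumble.toList.foldl (fun d c => d.insert c 0) (PySem.Dict.empty : PySem.Dict Char Int)).contains x
      = decide (x ∈ jumble.toList) := by
  rw [PySem.Dict.contains_eq_isSome_get?, pv_init_get?]
  by_cases h : x ∈ jumble.toList <;> simp [h]

-- ===== VERDICT (by name: the statement is the Claim_ definition above) =====
theorem all_letters_sufficiently_used_spec : Claim_equal_all_letters_sufficiently_used := by
  intro jumble words _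
  unfold Spec_all_letters_sufficiently_used all_letters_sufficiently_used all_letters_sufficiently_used_alt
  simp only []
  set d0 : PySem.Dict Char Int :=
    jumble.toList.foldl (fun d c => d.insert c 0) PySem.Dict.empty with hd0
  set df := words.foldl (fun d word =>
      word.toList.foldl (fun d c => if d.contains c then d.modify c 0 (· + 1) else d) d) d0 with hdf
  have hkeys : df.keys = d0.keys := pv_outer_keys _ _
  have hnd : df.keys.Nodup := by
    rw [hkeys, hd0]
    exact PySem.Dict.nodup_keys_foldl_insert _ _ _ PySem.Dict.nodup_keys_empty
  rw [PySem.Dict.values_eq_map_keys df hnd 0, List.all_map, hkeys]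
  have hmem : ∀ x, x ∈ d0.keys ↔ x ∈ jumble.toList := by
    intro x
    rw [← PySem.Dict.contains_iff_mem_keys, pv_d0_contains]
    simp
  have hval : ∀ x ∈ d0.keys,
      df.getD x 0 = (words.map (fun w => (w.toList.count x : Int))).sum := by
    intro x hx
    have hc : d0.contains x = true := (PySem.Dict.contains_iff_mem_keys _ _).mpr hx
    have h0 : d0.getD x 0 = 0 := by
      rw [PySem.Dict.getD_eq_get?_getD, hd0, pv_init_get?]
      simp [(hmem x).mp hx]
    rw [hdf, pv_outer_getD _ _ _ hc, h0, zero_add]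
  rw [Bool.eq_iff_iff, List.all_eq_true, List.all_eq_true]
  constructor
  · intro h c hc
    rw [PySem.Set.mem_ofList] at hc
    have := h c ((hmem c).mpr hc)
    simpa [hval c ((hmem c).mpr hc)] using this
  · intro h c hc
    have := h c ((PySem.Set.mem_ofList _ _).mpr ((hmem c).mp hc))
    simpa [hval c hc] using this
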